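-- pv_equiv track=rewrite | github.com/hyeokjinson/algorithm | ps프로젝트/알고리즘/2번.py | check5
-- ===== SOURCE A (Python) =====
-- def check5(inp_str):
--     dic={}
--     for x in inp_str:
--         if x not in dic:
--             dic[x]=1
--         else:
--             dic[x]+=1
--     for key,value in dic.items():
--         if value>=5:
--             return False
--     return True
-- ===== SOURCE B (Python) =====
-- def check5(inp_str):
--     prev = None
--     run = 0
--     for c in sorted(inp_str):
--         run = run + 1 if c == prev else 1
--         if run >= 5:
--             return False
--         prev = c
--     return True
-- ===== Notes on version B (the rewrite author's own statement) =====
-- stated objective: alternative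
-- what changed: Replaced the build-a-frequency-dict-then-scan-it algorithm with sort-then-detect: sort the characters and scan once for a consecutive run of length 5, which exists iff some character occurs 5+ times.
import Mathlib
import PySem

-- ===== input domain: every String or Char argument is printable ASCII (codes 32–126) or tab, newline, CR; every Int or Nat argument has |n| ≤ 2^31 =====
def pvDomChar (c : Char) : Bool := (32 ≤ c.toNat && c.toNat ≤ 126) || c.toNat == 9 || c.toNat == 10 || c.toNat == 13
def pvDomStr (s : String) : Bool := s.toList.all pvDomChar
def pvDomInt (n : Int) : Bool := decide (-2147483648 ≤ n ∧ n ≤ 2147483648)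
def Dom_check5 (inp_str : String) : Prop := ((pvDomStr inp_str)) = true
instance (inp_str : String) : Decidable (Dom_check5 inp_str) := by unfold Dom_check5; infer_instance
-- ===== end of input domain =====

-- B replaces A's frequency-dict build + scan with sort-then-detect a consecutive run of 5 (alternative algorithm).


-- ===== PORT A =====
def check5 (inp_str : String) : Bool :=
  -- dic = {}; for x in inp_str: if x not in dic: dic[x] = 1 else: dic[x] += 1
  let dic : PySem.Dict Char Int := inp_str.toList.foldl
    (fun d x => if d.contains x then d.modify x 0 (· + 1) else d.insert x 1)
    PySem.Dict.empty
  -- for key, value in dic.items(): if value >= 5: return False; return True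
  !dic.items.any (fun kv => 5 ≤ kv.2)

-- ===== PORT B =====
-- the for-loop of Source B over sorted(inp_str), with state (prev, run); 'return False' = the false branch
def scanRuns : List Char → Option Char → Int → Bool
  | [], _, _ => true
  | c :: rest, prev, run =>
    let run' : Int := if prev = some c then run + 1 else 1
    if 5 ≤ run' then false else scanRuns rest (some c) run'

def check5_alt (inp_str : String) : Bool :=
  scanRuns (PySem.List.sorted inp_str.toList (fun x => x) false) none 0

-- ===== PRECONDITION & SPEC =====
def Spec_check5 (inp_str : String) (out : Bool) : Prop := out = check5_alt inp_str
instance (inp_str : String) (out : Bool) : Decidable (Spec_check5 inp_str out) := by unfold Spec_check5; infer_instance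

-- ===== CLAIM (what is proved, stated in full; the proofs are below) =====
def Claim_equal_check5 : Prop := ∀ (inp_str : String), Dom_check5 inp_str → Spec_check5 inp_str (check5 inp_str)

-- ===== LEMMAS AND PROOFS =====
-- A's loop body is exactly Counter's update, whether or not the key is present.
lemma step_eq_modify (d : PySem.Dict Char Int) (x : Char) :
    (if d.contains x then d.modify x 0 (· + 1) else d.insert x 1) = d.modify x 0 (· + 1) := by
  by_cases h : d.contains x = true
  · simp [h]
  · have h' : d.contains x = false := Bool.eq_false_iff.mpr h
    simp [h, PySem.Dict.modify, PySem.Dict.getD_of_not_contains d (0 : Int) h']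

lemma dic_eq_counter (cs : List Char) :
    cs.foldl (fun d x => if d.contains x then d.modify x 0 (· + 1) else d.insert x 1)
      PySem.Dict.empty = PySem.Dict.counter cs := by
  rw [PySem.Dict.counter_eq_foldl]
  exact PySem.List.foldl_congr_mem _ _ _ _ (fun d x _ => step_eq_modify d x)

-- A = false iff some character occurs at least 5 times.
lemma check5_false_iff (s : String) :
    check5 s = false ↔ ∃ c : Char, 5 ≤ (s.toList.count c : Int) := by
  unfold check5
  simp only [dic_eq_counter, PySem.Dict.items_counter, Bool.not_eq_false',
    List.any_map, List.any_eq_true, Function.comp_def, decide_eq_true_eq]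
  constructor
  · rintro ⟨c, _, hc⟩; exact ⟨c, hc⟩
  · rintro ⟨c, hc⟩
    refine ⟨c, ?_, hc⟩
    rw [PySem.Set.mem_ofList, ← List.count_pos_iff]
    omega

-- Invariant of B's scan on a sorted list: it hits 'false' iff the pending run for prev
-- plus prev's remaining occurrences, or some character's full run, reaches 5.
lemma scanRuns_false_iff (l : List Char) : ∀ (prev : Option Char) (r : Int),
    r < 5 → l.Pairwise (· ≤ ·) →
    (∀ p, prev = some p → ∀ x ∈ l, p ≤ x) →
    (scanRuns l prev r = false ↔
      ∃ c : Char, 5 ≤ (if prev = some c then r else 0) + (l.count c : Int)) := by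
  induction l with
  | nil =>
    intro prev r hr _ _
    simp only [scanRuns, List.count_nil]
    constructor
    · intro h; cases h
    · rintro ⟨c, hc⟩
      split at hc <;> omega
  | cons c rest ih =>
    intro prev r hr hsort hprev
    have hcr : ∀ x ∈ rest, c ≤ x := fun x hx => (List.pairwise_cons.mp hsort).1 x hx
    have hrest : rest.Pairwise (· ≤ ·) := (List.pairwise_cons.mp hsort).2
    by_cases hp : prev = some c
    · by_cases h5 : (5 : Int) ≤ r + 1
      · simp only [scanRuns, hp, if_true, if_pos h5]
        constructor
        · intro _
          refine ⟨c, ?_⟩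
          simp only [if_true, List.count_cons_self]
          have : (0 : Int) ≤ (rest.count c : Int) := Int.natCast_nonneg _
          push_cast; omega
        · intro _; trivial
      · simp only [scanRuns, hp, if_true, if_neg h5]
        rw [ih (some c) (r + 1) (by omega) hrest
          (by rintro p hpc x hx; cases Option.some.inj hpc; exact hcr x hx)]
        apply exists_congr
        intro d
        by_cases hdc : d = c
        · have e2 : some c = some d := by rw [hdc]
          simp only [if_pos e2, List.count_cons, beq_iff_eq, if_pos hdc.symm]
          omega
        · have hcd : ¬ c = d := fun h => hdc h.symm
          have h1 : ¬ (some c = some d) := fun h => hdc (Option.some.inj h).symm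
          simp only [if_neg h1, List.count_cons, beq_iff_eq, if_neg hcd]
          omega
    · have h51 : ¬ (5 : Int) ≤ 1 := by omega
      simp only [scanRuns, if_neg hp, if_neg h51]
      rw [ih (some c) 1 (by omega) hrest
        (by rintro p hpc x hx; cases Option.some.inj hpc; exact hcr x hx)]
      apply exists_congr
      intro d
      by_cases hpd : prev = some d
      · -- d is the old prev character; it is strictly below c, hence absent from c :: rest
        have hdc : d ≠ c := fun h => hp (h ▸ hpd)
        have hdlt : d < c := lt_of_le_of_ne (hprev d hpd c (List.mem_cons_self)) hdc
        have hnot : d ∉ rest := fun hx => absurd (hcr d hx) (not_le.mpr hdlt)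
        have hc0 : rest.count d = 0 := List.count_eq_zero.mpr hnot
        have h1 : ¬ (some c = some d) := fun h => hdc (Option.some.inj h).symm
        have hcd : ¬ c = d := fun h => hdc h.symm
        simp only [if_pos hpd, if_neg h1, List.count_cons, beq_iff_eq, if_neg hcd, hc0]
        omega
      · by_cases hdc : d = c
        · have e2 : some c = some d := by rw [hdc]
          simp only [if_neg hpd, if_pos e2, List.count_cons, beq_iff_eq, if_pos hdc.symm]
          omega
        · have hcd : ¬ c = d := fun h => hdc h.symm
          have h1 : ¬ (some c = some d) := fun h => hdc (Option.some.inj h).symm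
          simp only [if_neg hpd, if_neg h1, List.count_cons, beq_iff_eq, if_neg hcd]
          omega

-- B = false iff some character occurs at least 5 times.
lemma check5_alt_false_iff (s : String) :
    check5_alt s = false ↔ ∃ c : Char, 5 ≤ (s.toList.count c : Int) := by
  unfold check5_alt
  rw [scanRuns_false_iff _ none 0 (by omega)
    (PySem.List.sorted_pairwise s.toList (fun x => x) )
    (by rintro p h; cases h)]
  apply exists_congr
  intro c
  rw [(PySem.List.sorted_perm s.toList (fun x => x) false).count_eq]
  simp

-- ===== VERDICT (by name: the statement is the Claim_ definition above) =====
theorem check5_spec : Claim_equal_check5 := by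
  intro s _
  unfold Spec_check5
  have h := (check5_false_iff s).trans (check5_alt_false_iff s).symm
  cases h1 : check5 s <;> cases h2 : check5_alt s <;> simp_all
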